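-- pv_equiv track=rewrite | github.com/segelmark/advent-of-code | Advent of Code/Day8/day8.py | open_image
-- ===== SOURCE A (Python) =====
-- def open_image(image,width,height):
--     layers=[]
--
--     i=0
--     for pixel in image:
--         layer=i//(width*height)
--
--         if(i%(width*height)==0 or i==0):
--             layers.append([])
--         row=(i-layer*width*height)//width
--
--         if(i%(width)==0 or i==0):
--             layers[layer].append([])
--
--         layers[layer][row].append(pixel)
--         i+=1
--
--     return layers
-- ===== SOURCE B (Python) =====
-- def open_image(image, width, height):
--     size = width * height
--     layers = [image[l:l + size] for l in range(0, len(image), size)]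
--     return [[layer[r:r + width] for r in range(0, len(layer), width)]
--             for layer in layers]
-- ===== Notes on version B (the rewrite author's own statement) =====
-- stated objective: simpler
-- what changed: Replaces the per-pixel loop that threads a running index through // and % and appends into layers[layer][row] with two slicing comprehensions (layer blocks of size width*height, then width-sized rows); bulk slice copies avoid per-pixel interpreted arithmetic, a constant-factor speedup.
-- outside the precondition, e.g. on open_image([1, 2, 3], -1, 2): A returns [[[1], [2]], [[3]]], B returns []; on open_image([1, 2, 3], 0, 1): A raises ZeroDivisionError, B raises ValueError; on open_image([], 0, 0): A returns [], B raises ValueError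
import Mathlib
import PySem

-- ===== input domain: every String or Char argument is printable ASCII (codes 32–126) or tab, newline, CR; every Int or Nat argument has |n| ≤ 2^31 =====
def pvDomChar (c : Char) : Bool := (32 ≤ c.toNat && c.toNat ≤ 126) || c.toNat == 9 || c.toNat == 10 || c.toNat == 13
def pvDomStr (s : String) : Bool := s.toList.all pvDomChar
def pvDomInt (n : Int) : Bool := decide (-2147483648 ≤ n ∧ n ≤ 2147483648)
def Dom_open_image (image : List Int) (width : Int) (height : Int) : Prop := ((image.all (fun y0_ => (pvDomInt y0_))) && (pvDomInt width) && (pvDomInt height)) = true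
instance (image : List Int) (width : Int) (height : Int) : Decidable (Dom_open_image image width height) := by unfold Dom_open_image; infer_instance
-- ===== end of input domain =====

-- B replaces A's per-pixel index bookkeeping (// and % on a running counter) with two
-- slicing comprehensions (layer blocks of size width*height, then rows of size width):
-- a simpler decomposition, same O(n) cost.


-- ===== PORT A =====
-- the body of A's `for pixel in image` loop; state = (layers, i)
def open_image_step (width : Int) (height : Int)
    (st : List (List (List Int)) × Int) (pixel : Int) : List (List (List Int)) × Int :=
  let layers := st.1
  let i := st.2
  let layer := PySem.Int.floordiv i (width * height)
  let layers := if PySem.Int.mod i (width * height) == 0 || i == 0 then layers ++ [[]] else layers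
  let row := PySem.Int.floordiv (i - layer * (width * height)) width
  let layers := if PySem.Int.mod i width == 0 || i == 0 then
      PySem.List.pySetD layers layer (PySem.List.pyGetD layers layer [] ++ [([] : List Int)])
    else layers
  let layers := PySem.List.pySetD layers layer
      (PySem.List.pySetD (PySem.List.pyGetD layers layer []) row
        (PySem.List.pyGetD (PySem.List.pyGetD layers layer []) row [] ++ [pixel]))
  (layers, i + 1)

def open_image (image : List Int) (width : Int) (height : Int) : List (List (List Int)) :=
  (image.foldl (open_image_step width height) ([], 0)).1

-- ===== PORT B =====
def open_image_alt (image : List Int) (width : Int) (height : Int) : List (List (List Int)) :=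
  let size := width * height
  let layers := (PySem.List.pyRange 0 (image.length : Int) size).map
      (fun l => PySem.List.slice image (some l) (some (l + size)))
  layers.map (fun layer =>
    (PySem.List.pyRange 0 (layer.length : Int) width).map
      (fun r => PySem.List.slice layer (some r) (some (r + width))))

-- ===== PRECONDITION & SPEC =====
-- Pre_ restricts to the natural domain of image dimensions: positive width and height.
-- Outside it (non-positive dimensions) A raises ZeroDivisionError when width*height == 0 and
-- the image is non-empty, and otherwise returns accidental nestings produced by floor
-- division on non-positive sizes (or [] for an empty image), while B raises ValueError or
-- returns [] — a corner no caller of an image decoder specifies.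
def Pre_open_image (image : List Int) (width : Int) (height : Int) : Prop :=
  0 < width ∧ 0 < height
instance (image : List Int) (width : Int) (height : Int) : Decidable (Pre_open_image image width height) := by unfold Pre_open_image; infer_instance

def pvWitness_open_image : List Int × Int × Int := ([1, 2, 3, 4, 5], 2, 2)

def Spec_open_image (image : List Int) (width : Int) (height : Int) (out : List (List (List Int))) : Prop := out = open_image_alt image width height
instance (image : List Int) (width : Int) (height : Int) (out : List (List (List Int))) : Decidable (Spec_open_image image width height out) := by unfold Spec_open_image; infer_instance

-- ===== CLAIM (what is proved, stated in full; the proofs are below) =====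
def Claim_equal_open_image : Prop := ∀ (image : List Int) (width : Int) (height : Int), Dom_open_image image width height → Pre_open_image image width height → Spec_open_image image width height (open_image image width height)

-- ===== LEMMAS AND PROOFS =====

def chunks (s : Nat) : List α → List (List α)
  | [] => []
  | x :: t => (x :: t.take s) :: chunks s (t.drop s)
termination_by xs => xs.length
decreasing_by simp

theorem chunks_nil (s : Nat) : chunks s ([] : List α) = [] := by rw [chunks]
theorem chunks_cons (s : Nat) (x : α) (t : List α) :
    chunks s (x :: t) = (x :: t.take s) :: chunks s (t.drop s) := by rw [chunks]

theorem length_chunks (s : Nat) (xs : List α) :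
    (chunks s xs).length = (xs.length + s) / (s + 1) := by
  induction xs using chunks.induct (s := s) with
  | case1 => simp [chunks_nil, Nat.div_eq_of_lt (Nat.lt_succ_self s)]
  | case2 x t ih =>
    rw [chunks_cons]
    simp only [List.length_cons, List.length_drop] at *
    rw [ih]
    rcases Nat.lt_or_ge t.length s with h | h
    · have l1 : t.length + 1 + s = t.length + (s + 1) := by omega
      have l2 : t.length - s + s = s := by omega
      rw [l1, Nat.add_div_right _ (by omega), l2, Nat.div_eq_of_lt (by omega),
        Nat.div_eq_of_lt (by omega)]
    · have h1 : t.length + 1 + s = (t.length - s + s) + (s + 1) := by omega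
      rw [h1, Nat.add_div_right _ (by omega)]

theorem chunks_snoc (s : Nat) (xs : List α) (x : α) :
    chunks s (xs ++ [x]) =
      if xs.length % (s + 1) = 0 then chunks s xs ++ [[x]]
      else (chunks s xs).set (xs.length / (s + 1))
             ((chunks s xs).getD (xs.length / (s + 1)) [] ++ [x]) := by
  induction xs using chunks.induct (s := s) with
  | case1 => simp [chunks_nil, chunks_cons]
  | case2 y t ih =>
    rw [List.cons_append, chunks_cons, chunks_cons]
    simp only [List.length_cons, List.length_drop] at *
    rcases Nat.lt_or_ge t.length s with h | h
    · have d0 : (t.length + 1) / (s + 1) = 0 := Nat.div_eq_of_lt (by omega)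
      have m0 : (t.length + 1) % (s + 1) = t.length + 1 := Nat.mod_eq_of_lt (by omega)
      rw [List.take_of_length_le (by simp; omega), List.drop_eq_nil_of_le (by simp; omega),
        List.take_of_length_le (by omega), List.drop_eq_nil_of_le (by omega), chunks_nil,
        m0, d0, if_neg (by omega)]
      simp
    · have e : t.length + 1 = (t.length - s) + (s + 1) := by omega
      have hm : (t.length + 1) % (s + 1) = (t.length - s) % (s + 1) := by
        rw [e, Nat.add_mod_right]
      have hd : (t.length + 1) / (s + 1) = (t.length - s) / (s + 1) + 1 := by
        rw [e, Nat.add_div_right _ (by omega)]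
      rw [List.take_append_of_le_length h, List.drop_append_of_le_length h, ih, hm, hd]
      split_ifs with hc
      · simp
      · simp

theorem getD_chunks_last (s : Nat) (xs : List α) (h : xs.length % (s + 1) ≠ 0) :
    ((chunks s xs).getD (xs.length / (s + 1)) []).length = xs.length % (s + 1) := by
  induction xs using chunks.induct (s := s) with
  | case1 => simp at h
  | case2 y t ih =>
    rw [chunks_cons]
    simp only [List.length_cons, List.length_drop] at *
    rcases Nat.lt_or_ge t.length s with hlt | hge
    · rw [Nat.div_eq_of_lt (by omega), Nat.mod_eq_of_lt (by omega)]
      simp [List.take_of_length_le (le_of_lt hlt)]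
    · have e : t.length + 1 = (t.length - s) + (s + 1) := by omega
      have hm : (t.length + 1) % (s + 1) = (t.length - s) % (s + 1) := by
        rw [e, Nat.add_mod_right]
      have hd : (t.length + 1) / (s + 1) = (t.length - s) / (s + 1) + 1 := by
        rw [e, Nat.add_div_right _ (by omega)]
      rw [hm] at h
      rw [hm, hd]
      simpa using ih h


theorem pyRange_pos_cons (a b s : Int) (hs : 0 < s) (hab : a < b) :
    PySem.List.pyRange a b s = a :: PySem.List.pyRange (a + s) b s := by
  rw [PySem.List.pyRange_of_pos _ _ hs, PySem.List.pyRange_of_pos _ _ hs, if_pos hab]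
  have hcnt : ((b - a + s - 1) / s).toNat
      = (if a + s < b then ((b - (a + s) + s - 1) / s).toNat else 0) + 1 := by
    by_cases h2 : a + s < b
    · rw [if_pos h2]
      have he : b - a + s - 1 = (b - (a + s) + s - 1) + 1 * s := by ring
      rw [he, Int.add_mul_ediv_right _ _ (by omega)]
      have hq : 0 ≤ (b - (a + s) + s - 1) / s := Int.ediv_nonneg (by omega) (by omega)
      omega
    · rw [if_neg h2]
      have h1 : (b - a + s - 1) / s = 1 := by
        rw [← PySem.Int.floordiv_eq_ediv_of_pos hs, PySem.Int.floordiv_eq_iff_of_pos hs]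
        constructor <;> nlinarith
      rw [h1]
      omega
  rw [hcnt, List.range_succ_eq_map, List.map_cons, List.map_map]
  congr 1
  · simp
  · apply List.map_congr_left
    intro k _
    simp only [Function.comp_apply]
    push_cast
    ring

theorem pyRange_pos_shift (a b s : Int) (hs : 0 < s) :
    PySem.List.pyRange a b s = (PySem.List.pyRange 0 (b - a) s).map (· + a) := by
  rw [PySem.List.pyRange_of_pos _ _ hs, PySem.List.pyRange_of_pos _ _ hs, List.map_map]
  rw [if_congr (show a < b ↔ 0 < b - a by omega) rfl rfl]
  have he : b - a - 0 = b - a := by ring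
  rw [he]
  apply List.map_congr_left
  intro k _
  simp only [Function.comp_apply]
  ring

theorem map_slice_pyRange (s : Int) (hs : 0 < s) : ∀ (N : Nat) (xs : List α), xs.length ≤ N →
    (PySem.List.pyRange 0 (xs.length : Int) s).map
      (fun l => PySem.List.slice xs (some l) (some (l + s))) = chunks (s.toNat - 1) xs := by
  intro N
  induction N with
  | zero =>
    intro xs hxs
    have : xs = [] := List.eq_nil_of_length_eq_zero (by omega)
    subst this
    simp [chunks_nil, PySem.List.pyRange_of_pos _ _ hs]
  | succ N ih =>
    intro xs hxs
    match xs with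
    | [] => simp [chunks_nil, PySem.List.pyRange_of_pos _ _ hs]
    | x :: t =>
      have hs1 : s.toNat = (s.toNat - 1) + 1 := by omega
      have hm : (0:Int) < ((x :: t).length : Int) := by simp
      rw [pyRange_pos_cons _ _ _ hs hm, List.map_cons, zero_add,
        pyRange_pos_shift _ _ _ hs, List.map_map]
      -- head slice = first chunk
      have hhead : PySem.List.slice (x :: t) (some 0) (some s) = x :: t.take (s.toNat - 1) := by
        rw [PySem.List.slice_toNat _ le_rfl (le_of_lt hs)]
        simp only [Int.toNat_zero, List.drop_zero, Nat.sub_zero]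
        conv_lhs => rw [hs1]
        rw [List.take_succ_cons]
      -- tail
      have htail : (PySem.List.pyRange 0 (((x :: t).length : Int) - s) s).map
            ((fun l => PySem.List.slice (x :: t) (some l) (some (l + s))) ∘ (· + s))
          = chunks (s.toNat - 1) (t.drop (s.toNat - 1)) := by
        by_cases hle : ((x :: t).length : Int) ≤ s
        · have h1 : PySem.List.pyRange 0 (((x :: t).length : Int) - s) s = [] := by
            rw [PySem.List.pyRange_of_pos _ _ hs, if_neg (by omega)]
            simp
          have h2 : t.drop (s.toNat - 1) = [] := List.drop_eq_nil_of_le (by simp at hle ⊢; omega)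
          rw [h1, h2, chunks_nil, List.map_nil]
        · rw [not_le] at hle
          have hdl : ((t.drop (s.toNat - 1)).length : Int) = ((x :: t).length : Int) - s := by
            simp at hle ⊢
            omega
          rw [← hdl]
          rw [← ih (t.drop (s.toNat - 1)) (by simp at hxs ⊢; omega)]
          apply List.map_congr_left
          intro l hl
          have hl0 : 0 ≤ l := ((PySem.List.mem_pyRange_iff_of_pos hs l).mp hl).1
          simp only [Function.comp_apply]
          rw [PySem.List.slice_toNat _ (by omega) (by omega),
            PySem.List.slice_toNat _ (by omega) (by omega)]
          have hd : List.drop (l + s).toNat (x :: t) = List.drop l.toNat (List.drop (s.toNat - 1) t) := by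
            rw [List.drop_drop]
            have : (l + s).toNat = ((s.toNat - 1) + l.toNat) + 1 := by omega
            rw [this, List.drop_succ_cons]
          rw [hd]
          congr 1
          omega
      rw [hhead, htail, chunks_cons]

theorem getD_map_of_lt (l : List α) (i : Nat) (d : α) (e : β) (f : α → β) (h : i < l.length) :
    (l.map f).getD i e = f (l.getD i d) := by
  simp [List.getD_eq_getElem?_getD, List.getElem?_eq_getElem h]

theorem set_snoc (l : List α) (a b : α) : (l ++ [a]).set l.length b = l ++ [b] := by
  rw [List.set_append_right _ _ (le_refl _)]
  simp

theorem getD_set_self (l : List α) (i : Nat) (a d : α) (h : i < l.length) :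
    (l.set i a).getD i d = a := by
  simp [List.getD_eq_getElem?_getD, h]

theorem getD_snoc (l : List α) (a d : α) : (l ++ [a]).getD l.length d = a := by
  simp [List.getD_eq_getElem?_getD]

-- the nested chunking both programs compute (w = width, c = width*height, as Nats)
def nest (w c : Nat) (xs : List Int) : List (List (List Int)) :=
  (chunks (c - 1) xs).map (chunks (w - 1))

theorem alt_eq_nest (image : List Int) (width height : Int)
    (hw : 0 < width) (hh : 0 < height) :
    open_image_alt image width height = nest width.toNat (width.toNat * height.toNat) image := by
  have hwh : 0 < width * height := mul_pos hw hh
  have hcast : width * height = ((width.toNat * height.toNat : Nat) : Int) := by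
    push_cast
    rw [Int.toNat_of_nonneg hw.le, Int.toNat_of_nonneg hh.le]
  simp only [open_image_alt, nest]
  rw [map_slice_pyRange (width * height) hwh image.length image le_rfl]
  have hCt : (width * height).toNat = width.toNat * height.toNat := by
    rw [hcast, Int.toNat_natCast]
  rw [hCt]
  apply List.map_congr_left
  intro layer _
  rw [map_slice_pyRange width hw layer.length layer le_rfl]

theorem ceil_div_of_mod_eq (m C : Nat) (hC0 : 0 < C) (h : m % C = 0) :
    (m + (C - 1)) / C = m / C := by
  have hdc : m / C * C = m := Nat.div_mul_cancel (Nat.dvd_of_mod_eq_zero h)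
  have e : m + (C - 1) = (C - 1) + (m / C) * C := by rw [hdc]; omega
  rw [e, Nat.add_mul_div_right _ _ hC0, Nat.div_eq_of_lt (by omega), Nat.zero_add]

theorem ceil_div_of_mod_ne (m C : Nat) (hC0 : 0 < C) (h : m % C ≠ 0) :
    (m + (C - 1)) / C = m / C + 1 := by
  have h1' : m / C * C + m % C = m := Nat.div_add_mod' m C
  have hr1 : 1 ≤ m % C := Nat.one_le_iff_ne_zero.mpr h
  have hrC : m % C < C := Nat.mod_lt _ hC0
  have e2 : (m / C + 1) * C = m / C * C + C := by ring
  have e : m + (C - 1) = (m % C - 1) + (m / C + 1) * C := by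
    rw [e2]
    zify [hr1, Nat.one_le_iff_ne_zero.mpr (Nat.pos_iff_ne_zero.mp hC0)]
    linarith [congrArg (Nat.cast : Nat → Int) h1']
  rw [e, Nat.add_mul_div_right _ _ hC0, Nat.div_eq_of_lt (by omega), Nat.zero_add]

theorem step_nest (width height : Int) (hw : 0 < width) (hh : 0 < height)
    (xs : List Int) (x : Int) :
    open_image_step width height (nest width.toNat (width.toNat * height.toNat) xs, (xs.length : Int)) x
      = (nest width.toNat (width.toNat * height.toNat) (xs ++ [x]), (xs.length : Int) + 1) := by
  have hwI : width = ((width.toNat : Nat) : Int) := (Int.toNat_of_nonneg hw.le).symm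
  have hCI : width * height = ((width.toNat * height.toNat : Nat) : Int) := by
    push_cast
    rw [Int.toNat_of_nonneg hw.le, Int.toNat_of_nonneg hh.le]
  set W := width.toNat with hWdef
  set C := width.toNat * height.toNat with hCdef
  have hW0 : 0 < W := by omega
  have hC0 : 0 < C := by
    have := mul_pos hw hh
    rw [hCI] at this
    omega
  have hWC : W ∣ C := Dvd.intro _ rfl
  set m := xs.length with hm
  set ch := chunks (C - 1) xs with hch
  set L := nest W C xs with hL
  have hLch : L = ch.map (chunks (W - 1)) := rfl
  clear_value W C m ch L
  have hCsucc : C - 1 + 1 = C := by omega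
  have hWsucc : W - 1 + 1 = W := by omega
  have hmmw : m % C % W = m % W := Nat.mod_mod_of_dvd m hWC
  have h1 : PySem.Int.floordiv (m:Int) (width*height) = ((m / C : Nat) : Int) := by
    rw [hCI]; exact PySem.Int.floordiv_natCast m C
  have h3 : (m:Int) - ((m / C : Nat) : Int) * (width*height) = ((m % C : Nat) : Int) := by
    have key := PySem.Int.floordiv_mul_add_mod (m:Int) (C:Int)
    rw [PySem.Int.floordiv_natCast, PySem.Int.mod_natCast] at key
    rw [hCI]; linarith
  have h5 : PySem.Int.floordiv ((m % C : Nat) : Int) width = (((m % C) / W : Nat) : Int) := by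
    rw [hwI]; exact PySem.Int.floordiv_natCast _ W
  have hb1 : (PySem.Int.mod (m:Int) (width*height) == 0 || ((m:Nat):Int) == 0) = decide (m % C = 0) := by
    rw [hCI, PySem.Int.mod_natCast]
    by_cases h : m % C = 0
    · simp [h]
    · have hm0 : m ≠ 0 := by intro e; rw [e] at h; simp at h
      simp [h, hm0]
      rw [Int.natCast_dvd_natCast]
      exact fun hd => h (Nat.mod_eq_zero_of_dvd hd)
  have hb2 : (PySem.Int.mod (m:Int) width == 0 || ((m:Nat):Int) == 0) = decide (m % W = 0) := by
    rw [hwI, PySem.Int.mod_natCast]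
    by_cases h : m % W = 0
    · simp [h]
    · have hm0 : m ≠ 0 := by intro e; rw [e] at h; simp at h
      simp [h, hm0]
      rw [Int.natCast_dvd_natCast]
      exact fun hd => h (Nat.mod_eq_zero_of_dvd hd)
  have hchlen : ch.length = (m + (C - 1)) / C := by
    rw [hch, hm, length_chunks, hCsucc]
  have hsnoc : chunks (C - 1) (xs ++ [x])
      = if m % C = 0 then ch ++ [[x]] else ch.set (m / C) (ch.getD (m / C) [] ++ [x]) := by
    have h := chunks_snoc (C - 1) xs x
    rw [hCsucc, ← hm, ← hch] at h
    exact h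
  have hnest : nest W C (xs ++ [x])
      = if m % C = 0 then L ++ [[[x]]]
        else L.set (m / C) (chunks (W - 1) (ch.getD (m / C) [] ++ [x])) := by
    rw [nest, hsnoc]
    split_ifs with hmc
    · rw [List.map_append, hLch]
      simp [chunks_cons, chunks_nil]
    · rw [List.map_set, hLch]
  simp only [open_image_step, h1, h3, h5, hb1, hb2, decide_eq_true_eq,
    PySem.List.pySetD_natCast, PySem.List.pyGetD_natCast]
  rw [hnest]
  by_cases hmc : m % C = 0
  · -- new layer, new row
    have hmw : m % W = 0 := by
      rw [← hmmw, hmc, Nat.zero_mod]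
    simp only [if_pos hmc, if_pos hmw]
    have hLlen : L.length = m / C := by
      rw [hLch, List.length_map, hchlen, ceil_div_of_mod_eq m C hC0 hmc]
    have t1 : (L ++ [[]]).getD (m / C) [] = [] := by
      rw [← hLlen]; exact getD_snoc L [] []
    have t2 : (L ++ [[]]).set (m / C) ([] ++ [[]]) = L ++ [[[]]] := by
      rw [← hLlen]; exact set_snoc L [] ([] ++ [[]])
    rw [t1, t2]
    have t3 : (L ++ [[[]]]).getD (m / C) [] = [[]] := by
      rw [← hLlen]; exact getD_snoc L [[]] []
    rw [t3]
    have hrow0 : m % C / W = 0 := by rw [hmc]; exact Nat.zero_div W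
    rw [hrow0]
    have t4 : ([[]] : List (List Int)).set 0 (([[]] : List (List Int)).getD 0 [] ++ [x]) = [[x]] := by
      simp
    rw [t4, ← hLlen, set_snoc]
  · -- existing layer
    simp only [if_neg hmc]
    have hlenB : ch.length = m / C + 1 := by
      rw [hchlen, ceil_div_of_mod_ne m C hC0 hmc]
    have hidx : m / C < ch.length := by omega
    have hidxL : m / C < L.length := by rw [hLch, List.length_map]; omega
    set ℓ := ch.getD (m / C) [] with hℓdef
    have hℓlen : ℓ.length = m % C := by
      have h := getD_chunks_last (C - 1) xs (by rw [hCsucc, ← hm]; exact hmc)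
      rw [hCsucc, ← hm, ← hch, ← hℓdef] at h
      exact h
    have gL : L.getD (m / C) [] = chunks (W - 1) ℓ := by
      rw [hLch]; exact getD_map_of_lt ch (m / C) [] [] (chunks (W - 1)) hidx
    have hflsnoc : chunks (W - 1) (ℓ ++ [x])
        = if m % C % W = 0 then chunks (W - 1) ℓ ++ [[x]]
          else (chunks (W - 1) ℓ).set (m % C / W) ((chunks (W - 1) ℓ).getD (m % C / W) [] ++ [x]) := by
      have h := chunks_snoc (W - 1) ℓ x
      rw [hWsucc, hℓlen] at h
      exact h
    have hfllen : m % W = 0 → (chunks (W - 1) ℓ).length = m % C / W := by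
      intro hmw
      rw [length_chunks, hWsucc, hℓlen,
        ceil_div_of_mod_eq (m % C) W hW0 (by rw [hmmw]; exact hmw)]
    by_cases hmw : m % W = 0
    · -- new row in existing layer
      simp only [if_pos hmw]
      rw [gL]
      have g2 : (L.set (m / C) (chunks (W - 1) ℓ ++ [[]])).getD (m / C) [] = chunks (W - 1) ℓ ++ [[]] :=
        getD_set_self L (m / C) _ [] hidxL
      rw [g2]
      have g3 : (chunks (W - 1) ℓ ++ [[]]).getD (m % C / W) [] = [] := by
        rw [← hfllen hmw]; exact getD_snoc (chunks (W - 1) ℓ) [] []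
      have g4 : (chunks (W - 1) ℓ ++ [[]]).set (m % C / W) ([] ++ [x]) = chunks (W - 1) ℓ ++ [[x]] := by
        rw [← hfllen hmw]; exact set_snoc (chunks (W - 1) ℓ) [] ([] ++ [x])
      rw [g3, g4, List.set_set, hflsnoc, if_pos (by rw [hmmw]; exact hmw)]
    · -- append to existing row
      simp only [if_neg hmw]
      rw [gL, hflsnoc, if_neg (by rw [hmmw]; exact hmw)]

theorem a_eq_nest (image : List Int) (width height : Int)
    (hw : 0 < width) (hh : 0 < height) :
    open_image image width height = nest width.toNat (width.toNat * height.toNat) image := by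
  unfold open_image
  suffices h : image.foldl (open_image_step width height) ([], 0)
      = (nest width.toNat (width.toNat * height.toNat) image, (image.length : Int)) by
    rw [h]
  induction image using List.reverseRecOn with
  | nil => simp [nest, chunks_nil]
  | append_singleton ys y ih =>
    rw [List.foldl_append, ih, List.foldl_cons, List.foldl_nil,
      step_nest width height hw hh ys y]
    simp

-- ===== VERDICT (by name: the statement is the Claim_ definition above) =====
theorem open_image_spec : Claim_equal_open_image := by
  intro image width height _ hpre
  unfold Spec_open_image
  rw [a_eq_nest image width height hpre.1 hpre.2, alt_eq_nest image width height hpre.1 hpre.2]
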